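-- pv_equiv track=rewrite | github.com/pagefaultgames/pokerogue | src/locales/fusion-affixes-generator.py | find_prefixes
-- ===== SOURCE A (Python) =====
-- def find_prefixes(word_list):
--     result = []
--     for word in word_list:
--         prefix = ""
--         for other_word in word_list:
--             if word != other_word:
--                 temp_prefix = ""
--                 for w, o in zip(word, other_word):
--                     if w == o:
--                         temp_prefix += w
--                     else:
--                         break
--                 if len(temp_prefix) > len(prefix):
--                     prefix = temp_prefix
--         # Find the first consonant after the prefix
--         suffix = ""
--         for i, char in enumerate(word[len(prefix):]):
--             suffix += char
--             if char.lower() in "bcdfghjklmnpqrstvwxzçßñ":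
--                 # Check if the next character is a hyphen
--                 if i+1 < len(word[len(prefix):]) and word[len(prefix)+i+1] == '-':
--                     suffix += '-'
--                 break
--         result.append(prefix + suffix)
--     return result
-- ===== SOURCE B (Python) =====
-- CONSONANTS = "bcdfghjklmnpqrstvwxzçßñ"
--
--
-- def _lcp_len(a, b):
--     n = min(len(a), len(b))
--     i = 0
--     while i < n and a[i] == b[i]:
--         i += 1
--     return i
--
--
-- def _entry(word, L):
--     rest = word[L:]
--     for i, c in enumerate(rest):
--         if c.lower() in CONSONANTS:
--             if i + 1 < len(rest) and rest[i + 1] == '-':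
--                 return word[:L + i + 1] + '-'
--             return word[:L + i + 1]
--     return word
--
--
-- def find_prefixes(word_list):
--     distinct = sorted(set(word_list))
--     best = {}
--     for i, w in enumerate(distinct):
--         L = 0
--         if i > 0:
--             L = _lcp_len(w, distinct[i - 1])
--         if i + 1 < len(distinct):
--             L = max(L, _lcp_len(w, distinct[i + 1]))
--         best[w] = L
--     return [_entry(w, best[w]) for w in word_list]
-- ===== Notes on version B (the rewrite author's own statement) =====
-- stated objective: faster
-- what changed: A compares every word against every other word to find its longest common prefix (all pairs); B sorts the distinct words once and takes each word's LCP only with its two sorted neighbours (then looks the length up per word), and builds each result as a single slice word[:L+i+1] instead of accumulating prefix and suffix strings.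
import Mathlib
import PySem

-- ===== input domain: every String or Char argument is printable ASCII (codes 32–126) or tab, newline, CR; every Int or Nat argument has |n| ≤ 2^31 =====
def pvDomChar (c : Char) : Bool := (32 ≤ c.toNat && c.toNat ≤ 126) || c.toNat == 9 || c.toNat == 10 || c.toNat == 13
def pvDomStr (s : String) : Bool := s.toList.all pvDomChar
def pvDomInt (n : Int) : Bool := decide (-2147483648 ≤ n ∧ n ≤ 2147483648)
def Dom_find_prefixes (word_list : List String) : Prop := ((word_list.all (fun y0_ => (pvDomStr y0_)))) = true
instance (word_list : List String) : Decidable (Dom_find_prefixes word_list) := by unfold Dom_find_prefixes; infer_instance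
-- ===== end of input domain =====

-- B replaces A's all-pairs longest-common-prefix scan by sorting the distinct words once and
-- taking each word's LCP only with its sorted neighbours (objective: faster, asymptotic).

-- ===== PORT A =====
def pvConsonants : List Char := "bcdfghjklmnpqrstvwxzçßñ".toList

-- temp_prefix loop: 'for w, o in zip(word, other_word): if w == o: temp += w else: break'
def pvTempPrefix : List Char → List Char → List Char
  | c :: cs, d :: ds => if c = d then c :: pvTempPrefix cs ds else []
  | _, _ => []

-- inner 'for other_word in word_list' loop keeping the longest temp_prefix
def pvPrefixA (word : String) (ws : List String) : List Char :=
  ws.foldl (fun pre other =>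
    if word ≠ other then
      let t := pvTempPrefix word.toList other.toList
      if t.length > pre.length then t else pre
    else pre) []

-- suffix loop: 'for i, char in enumerate(word[len(prefix):]): …' (break = stop recursing);
-- 'word[len(prefix)+i+1]' is in range under the guard, ported as the '?' lookup
def pvSuffixA (word : List Char) (plen : Nat) : List Char → Nat → List Char
  | [], _ => []
  | c :: cs, i =>
    if PySem.Chars.lowerChar c ∈ pvConsonants then
      if i + 1 < (word.drop plen).length ∧ word[plen + i + 1]? = some '-' then
        [c, '-']
      else [c]
    else c :: pvSuffixA word plen cs (i + 1)

def find_prefixes (word_list : List String) : List String :=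
  word_list.foldl (fun result word =>
    let pre := pvPrefixA word word_list
    result ++ [String.ofList (pre ++ pvSuffixA word.toList pre.length (word.toList.drop pre.length) 0)]) []

-- ===== PORT B =====
-- _lcp_len: 'while i < n and a[i] == b[i]: i += 1'
def pvLcpLen : List Char → List Char → Nat
  | a :: as, b :: bs => if a = b then pvLcpLen as bs + 1 else 0
  | _, _ => 0

-- _entry: scan rest for the first consonant, return word[:L+i+1] (plus hyphen) or the whole word
def pvEntryGo (word : List Char) (L : Nat) : List Char → Nat → List Char
  | [], _ => word
  | c :: cs, i =>
    if PySem.Chars.lowerChar c ∈ pvConsonants then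
      if i + 1 < (word.drop L).length ∧ (word.drop L)[i + 1]? = some '-' then
        word.take (L + i + 1) ++ ['-']
      else word.take (L + i + 1)
    else pvEntryGo word L cs (i + 1)

def pvEntry (word : List Char) (L : Nat) : List Char :=
  pvEntryGo word L (word.drop L) 0

-- body of the 'for i, w in enumerate(distinct)' loop
def pvNeighborVal (distinct : List String) (p : Int × String) : Nat :=
  let L := if p.1 > 0 then pvLcpLen p.2.toList (PySem.List.pyGetD distinct (p.1 - 1) "").toList else 0
  if p.1 + 1 < PySem.List.len distinct then
    max L (pvLcpLen p.2.toList (PySem.List.pyGetD distinct (p.1 + 1) "").toList)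
  else L

def find_prefixes_alt (word_list : List String) : List String :=
  let distinct := PySem.List.sorted (PySem.Set.ofList word_list) (fun x => x) false
  let best := (PySem.List.enumerate distinct).foldl
    (fun d p => d.insert p.2 (pvNeighborVal distinct p)) PySem.Dict.empty
  word_list.map (fun w => String.ofList (pvEntry w.toList (best.getD w 0)))

-- ===== PRECONDITION & SPEC =====
def Spec_find_prefixes (word_list : List String) (out : List String) : Prop := out = find_prefixes_alt word_list
instance (word_list : List String) (out : List String) : Decidable (Spec_find_prefixes word_list out) := by unfold Spec_find_prefixes; infer_instance

-- ===== CLAIM (what is proved, stated in full; the proofs are below) =====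
def Claim_equal_find_prefixes : Prop := ∀ (word_list : List String), Dom_find_prefixes word_list → Spec_find_prefixes word_list (find_prefixes word_list)

-- ===== LEMMAS AND PROOFS =====

-- abbreviations for the proofs
def pvS (word_list : List String) : List String :=
  PySem.List.sorted (PySem.Set.ofList word_list) (fun x => x) false

def pvLcpS (a b : String) : Nat := pvLcpLen a.toList b.toList

-- running max of A's inner loop
def pvMaxL (w : String) (ws : List String) : Nat :=
  ws.foldl (fun m o => if w ≠ o then max m (pvLcpS w o) else m) 0

-- Nat-index form of pvNeighborVal
def pvN (S : List String) (w : String) (k : Nat) : Nat :=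
  max (if 0 < k then pvLcpS w (S.getD (k - 1) "") else 0)
      (if k + 1 < S.length then pvLcpS w (S.getD (k + 1) "") else 0)

theorem pvLcpLen_symm (a b : List Char) : pvLcpLen a b = pvLcpLen b a := by
  induction a generalizing b with
  | nil => cases b <;> simp [pvLcpLen]
  | cons c cs ih =>
    cases b with
    | nil => simp [pvLcpLen]
    | cons d ds =>
      simp only [pvLcpLen]
      by_cases h : c = d
      · simp [h, ih]
      · simp [h, Ne.symm h]

theorem pvLcpLen_le_left (a b : List Char) : pvLcpLen a b ≤ a.length := by
  induction a generalizing b with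
  | nil => cases b <;> simp [pvLcpLen]
  | cons c cs ih =>
    cases b with
    | nil => simp [pvLcpLen]
    | cons d ds =>
      simp only [pvLcpLen, List.length_cons]
      split_ifs with h
      · exact Nat.succ_le_succ (ih ds)
      · omega

theorem pvTempPrefix_eq (a b : List Char) : pvTempPrefix a b = a.take (pvLcpLen a b) := by
  induction a generalizing b with
  | nil => cases b <;> simp [pvTempPrefix, pvLcpLen]
  | cons c cs ih =>
    cases b with
    | nil => simp [pvTempPrefix, pvLcpLen]
    | cons d ds =>
      simp only [pvTempPrefix, pvLcpLen]
      split_ifs with h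
      · simp [List.take_succ_cons, ih]
      · simp

-- the sandwich fact: for a < b < c lexicographically, the LCPs of the outer pair are bounded
-- by the LCPs of the adjacent pairs
theorem pvLcp_sandwich (a b c : List Char)
    (h1 : List.Lex (· < ·) a b) (h2 : List.Lex (· < ·) b c) :
    pvLcpLen a c ≤ pvLcpLen b c ∧ pvLcpLen a c ≤ pvLcpLen a b := by
  induction a generalizing b c with
  | nil => constructor <;> simp [pvLcpLen]
  | cons x as ih =>
    cases b with
    | nil => cases h1
    | cons y bs =>
      cases c with
      | nil => cases h2
      | cons z cs =>
        simp only [pvLcpLen]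
        by_cases hxz : x = z
        · subst hxz
          have hy1 : x < y ∨ (x = y ∧ List.Lex (· < ·) as bs) := by
            cases h1 with
            | rel h => exact Or.inl h
            | cons h => exact Or.inr ⟨rfl, h⟩
          rcases hy1 with h1' | ⟨e1, l1⟩
          · exfalso
            cases h2 with
            | rel h => exact absurd (lt_trans h1' h) (lt_irrefl x)
            | cons h => exact absurd h1' (lt_irrefl x)
          · subst e1
            have l2 : List.Lex (· < ·) bs cs := by
              cases h2 with
              | rel h => exact absurd h (lt_irrefl x)
              | cons h => exact h
            have := ih bs cs l1 l2
            simp only [if_pos rfl]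
            exact ⟨Nat.succ_le_succ this.1, Nat.succ_le_succ this.2⟩
        · simp [hxz]

theorem pvLex_of_lt {s t : String} (h : s < t) : List.Lex (· < ·) s.toList t.toList := by
  rw [String.lt_iff_toList_lt] at h
  rwa [← List.lt_iff_lex_lt]

theorem pvLcpS_symm (a b : String) : pvLcpS a b = pvLcpS b a := pvLcpLen_symm _ _

theorem pvLcpS_left {a b c : String} (h1 : a < b) (h2 : b < c) :
    pvLcpS a c ≤ pvLcpS b c :=
  (pvLcp_sandwich _ _ _ (pvLex_of_lt h1) (pvLex_of_lt h2)).1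

theorem pvLcpS_right {a b c : String} (h1 : a < b) (h2 : b < c) :
    pvLcpS a c ≤ pvLcpS a b :=
  (pvLcp_sandwich _ _ _ (pvLex_of_lt h1) (pvLex_of_lt h2)).2

-- A's inner loop keeps word.take of the running maximum LCP length
theorem pvPrefixA_inv (w : String) (ws : List String) :
    ∀ m : Nat, m ≤ w.toList.length →
    ws.foldl (fun pre other =>
      if w ≠ other then
        let t := pvTempPrefix w.toList other.toList
        if t.length > pre.length then t else pre
      else pre) (w.toList.take m)
    = w.toList.take (ws.foldl (fun m o => if w ≠ o then max m (pvLcpS w o) else m) m) := by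
  induction ws with
  | nil => intro m hm; simp
  | cons o os ih =>
    intro m hm
    simp only [List.foldl_cons]
    by_cases ho : w ≠ o
    · simp only [if_pos ho]
      have hlcp : (pvTempPrefix w.toList o.toList).length = pvLcpS w o := by
        rw [pvTempPrefix_eq, List.length_take]
        exact Nat.min_eq_left (pvLcpLen_le_left _ _)
      have hm' : (w.toList.take m).length = m := by
        rw [List.length_take]; omega
      rw [hlcp, hm']
      have hlen : pvLcpS w o ≤ w.toList.length := pvLcpLen_le_left _ _
      by_cases hgt : pvLcpS w o > m
      · rw [if_pos hgt, pvTempPrefix_eq]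
        rw [Nat.max_eq_right (le_of_lt hgt)]
        simp only [pvLcpS] at *
        exact ih _ hlen
      · rw [if_neg hgt, Nat.max_eq_left (by omega)]
        exact ih m hm
    · simp only [if_neg ho]
      exact ih m hm

theorem pvPrefixA_take (w : String) (ws : List String) :
    pvPrefixA w ws = w.toList.take (pvMaxL w ws) := by
  have := pvPrefixA_inv w ws 0 (Nat.zero_le _)
  simpa [pvPrefixA, pvMaxL] using this

theorem pvMaxL_le (w : String) (ws : List String) (K : Nat)
    (h : ∀ v ∈ ws, v ≠ w → pvLcpS w v ≤ K) : pvMaxL w ws ≤ K := by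
  unfold pvMaxL
  rw [PySem.List.foldl_ite_eq_foldl_filter (p := fun o => w ≠ o)]
  rw [← List.foldl_map (f := fun o => pvLcpS w o) (g := max)]
  rcases PySem.List.foldl_max_mem ((ws.filter (fun o => decide (w ≠ o))).map (fun o => pvLcpS w o)) 0 with hh | hh
  · omega
  · rw [List.mem_map] at hh
    obtain ⟨v, hv, he⟩ := hh
    rw [List.mem_filter] at hv
    rw [← he]
    exact h v hv.1 (by simpa using (Ne.symm (of_decide_eq_true hv.2)))

theorem pvLe_maxL (w : String) (ws : List String) {v : String}
    (hv : v ∈ ws) (hne : v ≠ w) : pvLcpS w v ≤ pvMaxL w ws := by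
  unfold pvMaxL
  rw [PySem.List.foldl_ite_eq_foldl_filter (p := fun o => w ≠ o)]
  exact (PySem.List.le_foldl_max_nat _ (fun o => pvLcpS w o) 0).2 v
    (by rw [List.mem_filter]; exact ⟨hv, by simpa using Ne.symm hne⟩)

theorem pvMaxL_le_len (w : String) (ws : List String) :
    pvMaxL w ws ≤ w.toList.length :=
  pvMaxL_le w ws _ (fun v _ _ => pvLcpLen_le_left _ _)

theorem pvS_nodup (ws : List String) : (pvS ws).Nodup := by
  have hperm := PySem.List.sorted_perm (PySem.Set.ofList ws) (fun x => x) false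
  exact hperm.nodup_iff.mpr (PySem.Set.nodup_ofList ws)

theorem pvS_mem (ws : List String) (v : String) : v ∈ pvS ws ↔ v ∈ ws := by
  have hperm := PySem.List.sorted_perm (PySem.Set.ofList ws) (fun x => x) false
  rw [pvS, hperm.mem_iff, PySem.Set.mem_ofList]

theorem pvS_pairwise (ws : List String) : (pvS ws).Pairwise (· < ·) := by
  rw [List.pairwise_iff_getElem]
  intro i j hi hj hij
  have hle := PySem.List.key_sorted_getElem_mono (PySem.Set.ofList ws) (fun x => x)
    (le_of_lt hij) hj
  have hne : (pvS ws)[i] ≠ (pvS ws)[j] := by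
    intro he
    have := (List.Nodup.getElem_inj_iff (pvS_nodup ws)).mp he
    omega
  exact lt_of_le_of_ne hle hne

-- A's global maximum over all differing words equals B's neighbour maximum in the sorted list
theorem pvMaxL_eq_N (ws : List String) (k : Nat) (hk : k < (pvS ws).length) :
    pvMaxL ((pvS ws)[k]) ws = pvN (pvS ws) ((pvS ws)[k]) k := by
  set S := pvS ws with hS
  have hlt : ∀ i j (hi : i < S.length) (hj : j < S.length), i < j → S[i] < S[j] :=
    List.pairwise_iff_getElem.mp (pvS_pairwise ws)
  set w := S[k] with hw
  apply Nat.le_antisymm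
  · apply pvMaxL_le
    intro v hv hne
    have hvS : v ∈ S := (pvS_mem ws v).mpr hv
    obtain ⟨j, hj, hvj⟩ := List.mem_iff_getElem.mp hvS
    have hjk : j ≠ k := by
      intro he; subst he; exact hne hvj.symm
    rcases Nat.lt_or_ge j k with hlt' | hge
    · have h0 : 0 < k := by omega
      have hk1 : k - 1 < S.length := by omega
      have hgd : S.getD (k - 1) "" = S[k - 1] := List.getD_eq_getElem S "" hk1
      have hbound : pvLcpS w v ≤ pvLcpS w (S[k - 1]) := by
        rcases Nat.lt_or_ge j (k - 1) with hj1 | hj1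
        · have ha : S[j] < S[k - 1] := hlt j (k - 1) hj hk1 hj1
          have hb : S[k - 1] < S[k] := hlt (k - 1) k hk1 hk (by omega)
          rw [pvLcpS_symm w v, pvLcpS_symm w (S[k-1]), ← hvj, hw]
          exact pvLcpS_left ha hb
        · have : j = k - 1 := by omega
          subst this
          rw [← hvj]
      rw [pvN]
      refine le_trans hbound ?_
      rw [if_pos h0, hgd]
      exact le_max_left _ _
    · have hgt : k < j := by omega
      have hk1 : k + 1 < S.length := by omega
      have hgd : S.getD (k + 1) "" = S[k + 1] := List.getD_eq_getElem S "" hk1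
      have hbound : pvLcpS w v ≤ pvLcpS w (S[k + 1]) := by
        rcases Nat.lt_or_ge (k + 1) j with hj1 | hj1
        · have ha : S[k] < S[k + 1] := hlt k (k + 1) hk hk1 (by omega)
          have hb : S[k + 1] < S[j] := hlt (k + 1) j hk1 hj hj1
          rw [← hvj, hw]
          exact pvLcpS_right ha hb
        · have : j = k + 1 := by omega
          subst this
          rw [← hvj]
      rw [pvN]
      refine le_trans hbound ?_
      rw [if_pos hk1, hgd]
      exact le_max_right _ _
  · rw [pvN]
    apply Nat.max_le.mpr
    constructor
    · split_ifs with h0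
      · have hk1 : k - 1 < S.length := by omega
        have hgd : S.getD (k - 1) "" = S[k - 1] := List.getD_eq_getElem S "" hk1
        rw [hgd]
        apply pvLe_maxL
        · exact (pvS_mem ws _).mp (List.getElem_mem hk1)
        · exact ne_of_lt (hlt (k - 1) k hk1 hk (by omega))
      · exact Nat.zero_le _
    · split_ifs with h1
      · have hgd : S.getD (k + 1) "" = S[k + 1] := List.getD_eq_getElem S "" h1
        rw [hgd]
        apply pvLe_maxL
        · exact (pvS_mem ws _).mp (List.getElem_mem h1)
        · exact ne_of_gt (hlt k (k + 1) hk h1 (by omega))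
      · exact Nat.zero_le _

theorem pvNeighborVal_cast (S : List String) (w : String) (k : Nat) :
    pvNeighborVal S ((k : Int), w) = pvN S w k := by
  unfold pvNeighborVal pvN
  have ec : ((k : Int) + 1) = (((k + 1 : Nat)) : Int) := by omega
  simp only [PySem.List.len_eq, gt_iff_lt, ec, Nat.cast_pos, Nat.cast_lt,
    PySem.List.pyGetD_natCast]
  by_cases h0 : 0 < k
  · have e1 : ((k : Int) - 1) = (((k - 1 : Nat)) : Int) := by omega
    rw [e1, PySem.List.pyGetD_natCast]
    simp only [if_pos h0]
    by_cases h2 : k + 1 < S.length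
    · simp only [if_pos h2]; rfl
    · simp only [if_neg h2]; simp [pvLcpS]
  · simp only [if_neg h0]
    by_cases h2 : k + 1 < S.length
    · simp only [if_pos h2]; rfl
    · simp only [if_neg h2]; simp

theorem pvDict_getD (S : List String) (hnd : S.Nodup) (k : Nat) (hk : k < S.length) :
    ((PySem.List.enumerate S).foldl
      (fun d p => d.insert p.2 (pvNeighborVal S p)) PySem.Dict.empty).getD (S[k]) 0
    = pvNeighborVal S ((k : Int), S[k]) := by
  have hitems := PySem.Dict.items_foldl_insert_fresh (PySem.List.enumerate S)
    (fun p => p.2) (fun p => pvNeighborVal S p) PySem.Dict.empty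
    (fun a _ => PySem.Dict.contains_empty _)
    (by rw [PySem.List.map_snd_enumerate]; exact hnd)
  apply PySem.Dict.getD_of_mem_items
  · rw [hitems]
    simp only [PySem.Dict.empty, List.nil_append]
    apply List.mem_map.mpr
    refine ⟨((k : Int), S[k]), ?_, rfl⟩
    rw [PySem.List.mem_enumerate_iff]
    exact ⟨k, hk, by simp⟩
  · have hkeys : ((PySem.List.enumerate S).foldl
        (fun d p => d.insert p.2 (pvNeighborVal S p)) PySem.Dict.empty).keys
        = PySem.Set.update (PySem.Dict.empty : PySem.Dict String Nat).keys
            ((PySem.List.enumerate S).map (fun p => p.2)) :=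
      PySem.Dict.keys_foldl_insert_key (PySem.List.enumerate S) (fun p => p.2) _ _
    rw [hkeys, PySem.List.map_snd_enumerate, PySem.Dict.keys_empty, PySem.Set.update_nil_left]
    exact PySem.Set.nodup_ofList S

-- merging A's prefix ++ suffix scan into B's single take
theorem pvMerge (w : List Char) (L : Nat) :
    ∀ (cs : List Char) (i : Nat), w.drop (L + i) = cs →
      w.take (L + i) ++ pvSuffixA w L cs i = pvEntryGo w L cs i := by
  intro cs
  induction cs with
  | nil =>
    intro i hdrop
    have hlen : w.length ≤ L + i := by
      by_contra hc
      have := List.drop_eq_nil_iff.mp hdrop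
      omega
    simp [pvSuffixA, pvEntryGo, List.take_of_length_le hlen]
  | cons c cs ih =>
    intro i hdrop
    have hi : L + i < w.length := by
      by_contra hc
      rw [List.drop_eq_nil_iff.mpr (by omega)] at hdrop
      simp at hdrop
    have hget : w[L + i]? = some c := by
      have h0 : (w.drop (L + i))[0]? = some c := by rw [hdrop]; rfl
      rw [List.getElem?_drop] at h0
      simpa using h0
    have htake : w.take (L + i + 1) = w.take (L + i) ++ [c] := by
      rw [List.take_add_one, hget]; rfl
    have hdrop' : w.drop (L + (i + 1)) = cs := by
      have h1 : L + (i + 1) = (L + i) + 1 := by omega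
      rw [h1, ← List.drop_drop, hdrop]
      rfl
    simp only [pvSuffixA, pvEntryGo]
    by_cases hcons : PySem.Chars.lowerChar c ∈ pvConsonants
    · simp only [if_pos hcons]
      have hguard : (i + 1 < (w.drop L).length ∧ w[L + i + 1]? = some '-')
          ↔ (i + 1 < (w.drop L).length ∧ (w.drop L)[i + 1]? = some '-') := by
        rw [List.getElem?_drop, Nat.add_assoc]
      by_cases hg : i + 1 < (w.drop L).length ∧ (w.drop L)[i + 1]? = some '-'
      · rw [if_pos (hguard.mpr hg), if_pos hg]
        rw [show [c, '-'] = [c] ++ ['-'] from rfl, ← List.append_assoc, ← htake]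
      · rw [if_neg (fun hh => hg (hguard.mp hh)), if_neg hg, ← htake]
    · simp only [if_neg hcons]
      rw [show w.take (L+i) ++ c :: pvSuffixA w L cs (i+1)
            = (w.take (L+i) ++ [c]) ++ pvSuffixA w L cs (i+1) by simp, ← htake]
      exact ih (i + 1) hdrop'

theorem pvEntryA_eq (w : List Char) (L : Nat) :
    w.take L ++ pvSuffixA w L (w.drop L) 0 = pvEntry w L := by
  have := pvMerge w L (w.drop L) 0 (by simp)
  simpa using this

-- ===== VERDICT (by name: the statement is the Claim_ definition above) =====
theorem find_prefixes_spec : Claim_equal_find_prefixes := by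
  unfold Claim_equal_find_prefixes
  intro word_list _
  unfold Spec_find_prefixes find_prefixes find_prefixes_alt
  rw [PySem.List.foldl_append_singleton_eq_map]
  simp only [List.nil_append]
  apply List.map_congr_left
  intro w hw
  obtain ⟨k, hk, hSk⟩ := List.mem_iff_getElem.mp ((pvS_mem word_list w).mpr hw)
  have hdict := pvDict_getD (pvS word_list) (pvS_nodup word_list) k hk
  rw [hSk] at hdict
  rw [show PySem.List.sorted (PySem.Set.ofList word_list) (fun x => x) false = pvS word_list from rfl]
  rw [hdict, pvNeighborVal_cast]
  have hN : pvN (pvS word_list) w k = pvMaxL w word_list := by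
    have := pvMaxL_eq_N word_list k hk
    rw [hSk] at this
    exact this.symm
  rw [hN]
  rw [pvPrefixA_take]
  have hL : pvMaxL w word_list ≤ w.toList.length := pvMaxL_le_len w word_list
  have hlen : (w.toList.take (pvMaxL w word_list)).length = pvMaxL w word_list := by
    rw [List.length_take]; omega
  rw [hlen, pvEntryA_eq]
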